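-- pv_equiv track=rewrite | github.com/Li-Pro/Word-Search | diclib/dicProduce.py | filterViewable
-- ===== SOURCE A (Python) =====
-- import string
--
-- VIEWABLES = string.digits + string.ascii_letters + string.punctuation + ' \n\t'
--
-- def isViewable(s):
-- 	return (s in VIEWABLES) or (ord(s) > 32)
--
-- def filterViewable(s):
-- 	S = ''
-- 	i, N = 0, len(s)
-- 	while i < N:
-- 		if not isViewable(s[i]):
-- 			S += ' '
--
-- 		while (i < N) and (not isViewable(s[i])):
-- 			i += 1
--
-- 		if i < N:
-- 			S += s[i]
-- 			i += 1
--
-- 	return S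
-- ===== SOURCE B (Python) =====
-- import string
--
-- VIEWABLES = string.digits + string.ascii_letters + string.punctuation + ' \n\t'
--
-- def isViewable(s):
-- 	return (s in VIEWABLES) or (ord(s) > 32)
--
-- def filterViewable(s):
-- 	out = []
-- 	pending = False
-- 	for ch in s:
-- 		if isViewable(ch):
-- 			if pending:
-- 				out.append(' ')
-- 			out.append(ch)
-- 			pending = False
-- 		else:
-- 			pending = True
-- 	if pending:
-- 		out.append(' ')
-- 	return ''.join(out)
-- ===== Notes on version B (the rewrite author's own statement) =====
-- stated objective: faster
-- what changed: Replaces the index-driven nested while loops with repeated string concatenation by a single for-each pass keeping a boolean flag and an output list joined once at the end.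
import Mathlib
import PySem

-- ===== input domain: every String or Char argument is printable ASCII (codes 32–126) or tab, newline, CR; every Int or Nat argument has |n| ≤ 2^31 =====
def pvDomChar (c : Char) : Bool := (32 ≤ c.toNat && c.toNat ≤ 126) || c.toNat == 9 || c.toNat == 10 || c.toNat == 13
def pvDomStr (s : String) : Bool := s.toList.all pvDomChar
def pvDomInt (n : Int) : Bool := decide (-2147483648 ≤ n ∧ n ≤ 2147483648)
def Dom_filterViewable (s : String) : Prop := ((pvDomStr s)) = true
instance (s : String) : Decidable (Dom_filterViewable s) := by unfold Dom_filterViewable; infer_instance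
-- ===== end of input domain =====

set_option maxRecDepth 8192

-- B replaces A's nested index-driven while loops by a single for-each pass with a pending-space flag (simpler, one pass).

-- VIEWABLES = string.digits + string.ascii_letters + string.punctuation + ' \n\t'
def VIEWABLES : String :=
  "0123456789abcdefghijklmnopqrstuvwxyzABCDEFGHIJKLMNOPQRSTUVWXYZ!\"#$%&'()*+,-./:;<=>?@[\\]^_`{|}~ \n\t"

-- def isViewable(s): return (s in VIEWABLES) or (ord(s) > 32)
def isViewable (c : Char) : Bool := VIEWABLES.toList.contains c || decide (c.toNat > 32)

-- ===== PORT A =====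
-- A's outer while over index i becomes structural recursion on the remaining characters;
-- the inner while that advances i past a non-viewable run becomes dropWhile on the same suffix.
def goA : List Char → List Char
  | [] => []
  | c :: rest =>
    if isViewable c then c :: goA rest
    else
      -- S += ' ' ; inner while skips the non-viewable run ; then if i < N: S += s[i]; i += 1
      match h : (c :: rest).dropWhile (fun x => !isViewable x) with
      | [] => [' ']
      | d :: tl => ' ' :: d :: goA tl
  termination_by l => l.length
  decreasing_by
    · simp
    · have := List.length_dropWhile_le (fun x => !isViewable x) (c :: rest)
      rw [h] at this
      simp at this ⊢
      omega

def filterViewable (s : String) : String := String.mk (goA s.toList)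

-- ===== PORT B =====
-- loop body of B's for-each pass: state is (out, pending)
def stepB (acc : List Char × Bool) (ch : Char) : List Char × Bool :=
  if isViewable ch then
    (if acc.2 then acc.1 ++ [' ', ch] else acc.1 ++ [ch], false)
  else
    (acc.1, true)

def filterViewable_alt (s : String) : String :=
  let st := s.toList.foldl stepB ([], false)
  String.mk (if st.2 then st.1 ++ [' '] else st.1)

-- ===== PRECONDITION & SPEC =====
def Spec_filterViewable (s : String) (out : String) : Prop := out = filterViewable_alt s
instance (s : String) (out : String) : Decidable (Spec_filterViewable s out) := by unfold Spec_filterViewable; infer_instance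

-- ===== CLAIM (what is proved, stated in full; the proofs are below) =====
def Claim_equal_filterViewable : Prop := ∀ (s : String), Dom_filterViewable s → Spec_filterViewable s (filterViewable s)

-- ===== LEMMAS AND PROOFS =====

theorem goA_nil : goA [] = [] := by unfold goA; rfl

theorem goA_cons_v (c : Char) (r : List Char) (hv : isViewable c = true) :
    goA (c :: r) = c :: goA r := by
  conv_lhs => rw [goA]
  simp [hv]

theorem goA_cons_nv (c : Char) (r : List Char) (hv : ¬ isViewable c = true) :
    goA (c :: r) = (match (c :: r).dropWhile (fun x => !isViewable x) with
      | [] => [' '] | d :: tl => ' ' :: d :: goA tl) := by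
  conv_lhs => rw [goA]
  simp only [hv, Bool.false_eq_true, if_false]
  split
  · rename_i heq; rw [heq]
  · rename_i d tl heq; rw [heq]

def finalize (st : List Char × Bool) : List Char := if st.2 then st.1 ++ [' '] else st.1

theorem foldl_stepB_acc (l : List Char) (acc : List Char) (p : Bool) :
    l.foldl stepB (acc, p) =
      (acc ++ (l.foldl stepB ([], p)).1, (l.foldl stepB ([], p)).2) := by
  induction l generalizing acc p with
  | nil => simp
  | cons c l ih =>
    simp only [List.foldl_cons, stepB]
    by_cases hv : isViewable c
    · simp only [hv, if_true]
      cases p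
      · simp only [Bool.false_eq_true, if_false, List.nil_append]
        rw [ih (acc ++ [c]) false, ih [c] false]
        simp
      · simp only [if_true, List.nil_append]
        rw [ih (acc ++ [' ', c]) false, ih [' ', c] false]
        simp
    · simp only [hv, Bool.false_eq_true, if_false]
      exact ih acc true

theorem foldl_stepB_true (l : List Char) :
    l.foldl stepB ([], true) =
      match l.dropWhile (fun x => !isViewable x) with
      | [] => ([], true)
      | d :: tl => (' ' :: d :: (tl.foldl stepB ([], false)).1, (tl.foldl stepB ([], false)).2) := by
  induction l with
  | nil => simp
  | cons c l ih =>
    by_cases hv : isViewable c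
    · simp only [List.foldl_cons, stepB, hv, if_true, List.dropWhile_cons, Bool.not_true,
        if_false, Bool.false_eq_true, List.nil_append]
      rw [foldl_stepB_acc]
      simp
    · simp only [List.foldl_cons, stepB, hv, if_false, Bool.false_eq_true, List.dropWhile_cons]
      simp only [Bool.not_false, if_true]
      exact ih

theorem goA_eq (l : List Char) : goA l = finalize (l.foldl stepB ([], false)) := by
  induction hn : l.length using Nat.strong_induction_on generalizing l with
  | _ n ih =>
  cases l with
  | nil => simp [goA_nil, finalize]
  | cons c rest =>
    by_cases hv : isViewable c
    · rw [goA_cons_v c rest hv]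
      rw [ih rest.length (by simp [← hn]) rest rfl]
      simp only [List.foldl_cons, stepB, hv, if_true, Bool.false_eq_true, if_false,
        List.nil_append]
      rw [foldl_stepB_acc rest [c] false]
      simp only [finalize]
      split <;> simp
    · rw [goA_cons_nv c rest hv]
      have hd : (c :: rest).dropWhile (fun x => !isViewable x)
          = rest.dropWhile (fun x => !isViewable x) := by
        simp [List.dropWhile_cons, hv]
      have hfold : (c :: rest).foldl stepB ([], false) = rest.foldl stepB ([], true) := by
        simp [stepB, hv]
      rw [hfold, foldl_stepB_true, hd]
      cases hcase : rest.dropWhile (fun x => !isViewable x) with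
      | nil => simp [finalize]
      | cons d tl =>
        have hn' : rest.length + 1 = n := by simpa using hn
        have htl : tl.length < n := by
          have := List.length_dropWhile_le (fun x => !isViewable x) rest
          rw [hcase] at this
          simp at this
          omega
        have hA := ih tl.length htl tl rfl
        simp only [hA, finalize]
        split <;> simp

-- ===== VERDICT (by name: the statement is the Claim_ definition above) =====
theorem filterViewable_spec : Claim_equal_filterViewable := by
  intro s _
  unfold Spec_filterViewable filterViewable filterViewable_alt
  rw [goA_eq]
  rfl
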